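-- pv_equiv track=rewrite | github.com/setsuna113/Geo_process | src/domain/resampling/engines/base_resampler.py | generate_resampling_windows
-- ===== SOURCE A (Python) =====
-- from typing import Dict, Optional, Tuple, Union, Any, Callable, Iterator
--
-- def generate_resampling_windows(source_shape: Tuple[int, int],
--                               window_size: int = 2048,
--                               overlap: int = 128) -> Iterator[Tuple[Tuple[int, int, int, int], int]]:
--     """
--     Generate windows for resampling with overlap to avoid edge artifacts.
--
--     Args:
--         source_shape: (height, width) of source raster
--         window_size: Size of windows in pixels
--         overlap: Overlap between windows
--
--     Yields:
--         Tuple of ((row_start, row_end, col_start, col_end), window_index)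
--     """
--     height, width = source_shape
--     step_size = window_size - overlap
--
--     window_idx = 0
--     for row_start in range(0, height, step_size):
--         row_end = min(row_start + window_size, height)
--
--         for col_start in range(0, width, step_size):
--             col_end = min(col_start + window_size, width)
--
--             yield (row_start, row_end, col_start, col_end), window_idx
--             window_idx += 1
-- ===== SOURCE B (Python) =====
-- def generate_resampling_windows(source_shape, window_size=2048, overlap=128):
--     height, width = source_shape
--     step_size = window_size - overlap
--     row_starts = list(range(0, height, step_size))
--     col_starts = list(range(0, width, step_size))
--     n_cols = len(col_starts)
--     total = len(row_starts) * n_cols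
--     for idx in range(total):
--         row_start = row_starts[idx // n_cols]
--         col_start = col_starts[idx % n_cols]
--         yield ((row_start, min(row_start + window_size, height),
--                 col_start, min(col_start + window_size, width)), idx)
-- ===== Notes on version B (the rewrite author's own statement) =====
-- stated objective: alternative
-- what changed: Replaces the nested row/col loops with a running window counter by one flat loop over range(total) that recovers row/col starts from the index by divmod into precomputed start lists.
import Mathlib
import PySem

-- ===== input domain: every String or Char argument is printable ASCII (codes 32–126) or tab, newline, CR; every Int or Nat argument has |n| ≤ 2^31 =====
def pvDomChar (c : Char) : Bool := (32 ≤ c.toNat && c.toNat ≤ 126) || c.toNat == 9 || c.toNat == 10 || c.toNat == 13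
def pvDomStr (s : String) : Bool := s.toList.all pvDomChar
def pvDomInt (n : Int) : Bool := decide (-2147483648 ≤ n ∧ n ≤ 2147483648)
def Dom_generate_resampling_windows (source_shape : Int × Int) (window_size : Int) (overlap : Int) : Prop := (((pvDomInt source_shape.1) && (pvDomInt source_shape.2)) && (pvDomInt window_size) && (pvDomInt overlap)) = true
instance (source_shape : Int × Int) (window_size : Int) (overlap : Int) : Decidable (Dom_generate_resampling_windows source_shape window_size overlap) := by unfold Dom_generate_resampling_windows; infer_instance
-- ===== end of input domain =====

-- B replaces A's nested row/col loops with one flat loop over range(total), recovering the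
-- row and column starts by divmod into precomputed start lists (alternative decomposition, same cost).


-- ===== PORT A =====
def generate_resampling_windows (source_shape : Int × Int) (window_size : Int) (overlap : Int) : List ((Int × Int × Int × Int) × Int) :=
  let height := source_shape.1
  let width := source_shape.2
  let step_size := window_size - overlap
  ((PySem.List.pyRange 0 height step_size).foldl
    (fun (acc : List ((Int × Int × Int × Int) × Int) × Int) row_start =>
      let row_end := min (row_start + window_size) height
      (PySem.List.pyRange 0 width step_size).foldl
        (fun (acc2 : List ((Int × Int × Int × Int) × Int) × Int) col_start =>
          let col_end := min (col_start + window_size) width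
          (acc2.1 ++ [((row_start, row_end, col_start, col_end), acc2.2)], acc2.2 + 1))
        acc)
    ([], 0)).1

-- ===== PORT B =====
def generate_resampling_windows_alt (source_shape : Int × Int) (window_size : Int) (overlap : Int) : List ((Int × Int × Int × Int) × Int) :=
  let height := source_shape.1
  let width := source_shape.2
  let step_size := window_size - overlap
  let row_starts := PySem.List.pyRange 0 height step_size
  let col_starts := PySem.List.pyRange 0 width step_size
  let n_cols : Int := col_starts.length
  let total : Int := (row_starts.length : Int) * n_cols
  (PySem.List.pyRange 0 total 1).map (fun idx =>
    -- the indices are always in range in Source B, so the .getD default is never used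
    let row_start := (PySem.List.pyGet? row_starts (PySem.Int.floordiv idx n_cols)).getD 0
    let col_start := (PySem.List.pyGet? col_starts (PySem.Int.mod idx n_cols)).getD 0
    ((row_start, min (row_start + window_size) height,
      col_start, min (col_start + window_size) width), idx))

-- ===== PRECONDITION & SPEC =====
-- Pre_ excludes window_size = overlap, where both Pythons raise ValueError (range() step 0).
def Pre_generate_resampling_windows (source_shape : Int × Int) (window_size : Int) (overlap : Int) : Prop := window_size - overlap ≠ 0
instance (source_shape : Int × Int) (window_size : Int) (overlap : Int) : Decidable (Pre_generate_resampling_windows source_shape window_size overlap) := by unfold Pre_generate_resampling_windows; infer_instance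
def pvWitness_generate_resampling_windows : (Int × Int) × Int × Int := ((5, 7), 3, 1)
def Spec_generate_resampling_windows (source_shape : Int × Int) (window_size : Int) (overlap : Int) (out : List ((Int × Int × Int × Int) × Int)) : Prop := out = generate_resampling_windows_alt source_shape window_size overlap
instance (source_shape : Int × Int) (window_size : Int) (overlap : Int) (out : List ((Int × Int × Int × Int) × Int)) : Decidable (Spec_generate_resampling_windows source_shape window_size overlap out) := by unfold Spec_generate_resampling_windows; infer_instance

-- ===== CLAIM (what is proved, stated in full; the proofs are below) =====
def Claim_equal_generate_resampling_windows : Prop := ∀ (source_shape : Int × Int) (window_size : Int) (overlap : Int), Dom_generate_resampling_windows source_shape window_size overlap → Pre_generate_resampling_windows source_shape window_size overlap → Spec_generate_resampling_windows source_shape window_size overlap (generate_resampling_windows source_shape window_size overlap)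

-- ===== LEMMAS AND PROOFS =====

-- the counting fold appends the enumerated elements (generic in the emitted list)
theorem pv_inner_fold {a : Type} (ys : List a) (acc : List (a × Int)) (k : Int) :
    ys.foldl (fun (p : List (a × Int) × Int) y => (p.1 ++ [(y, p.2)], p.2 + 1)) (acc, k)
      = (acc ++ (PySem.List.enumerate ys k).map (fun q => (q.2, q.1)), k + ys.length) := by
  induction ys generalizing acc k with
  | nil => simp
  | cons y ys ih =>
      simp only [List.foldl_cons, ih, PySem.List.enumerate_cons, List.map_cons, List.length_cons,
        Prod.mk.injEq]
      refine ⟨by simp, by push_cast; ring⟩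

-- outer fold of A appends the enumerated flattened row×col grid
theorem pv_outer_fold {a : Type} (F : Int → Int → a) (cols : List Int) (rows : List Int)
    (acc : List (a × Int)) (k : Int) :
    rows.foldl (fun (p : List (a × Int) × Int) rs =>
        cols.foldl (fun (p2 : List (a × Int) × Int) cs => (p2.1 ++ [(F rs cs, p2.2)], p2.2 + 1)) p) (acc, k)
      = (acc ++ (PySem.List.enumerate (rows.flatMap (fun rs => cols.map (F rs))) k).map (fun q => (q.2, q.1)),
         k + (rows.flatMap (fun rs => cols.map (F rs))).length) := by
  induction rows generalizing acc k with
  | nil => simp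
  | cons r rs ih =>
      have hinner : ∀ (acc2 : List (a × Int)) (k2 : Int),
          cols.foldl (fun (p2 : List (a × Int) × Int) cs => (p2.1 ++ [(F r cs, p2.2)], p2.2 + 1)) (acc2, k2)
            = (cols.map (F r)).foldl (fun (p : List (a × Int) × Int) y => (p.1 ++ [(y, p.2)], p.2 + 1)) (acc2, k2) := by
        intro acc2 k2
        rw [List.foldl_map]
      simp only [List.foldl_cons, hinner, pv_inner_fold, ih, List.flatMap_cons,
        PySem.List.enumerate_append, List.map_append, List.length_append, List.length_map,
        List.append_assoc, Prod.mk.injEq]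
      refine ⟨by simp, by push_cast; ring⟩

theorem pv_flat_length {a : Type} (F : Int → Int → a) (cols rows : List Int) :
    (rows.flatMap (fun rs => cols.map (F rs))).length = rows.length * cols.length := by
  induction rows with
  | nil => simp
  | cons r rs ih => simp [ih, Nat.succ_mul, Nat.add_comm]

-- indexing the flattened grid is divmod indexing into rows and cols
theorem pv_flat_get {a : Type} (F : Int → Int → a) (cols rows : List Int) (k : Nat)
    (hk : k < rows.length * cols.length) :
    (rows.flatMap (fun rs => cols.map (F rs)))[k]? =
      some (F (rows.getD (k / cols.length) 0) (cols.getD (k % cols.length) 0)) := by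
  induction rows generalizing k with
  | nil => simp at hk
  | cons r rs ih =>
      have hn : 0 < cols.length := by
        rcases Nat.eq_zero_or_pos cols.length with h | h
        · rw [h] at hk; simp at hk
        · exact h
      simp only [List.flatMap_cons]
      by_cases hlt : k < cols.length
      · rw [List.getElem?_append_left (by simpa using hlt)]
        rw [Nat.div_eq_of_lt hlt, Nat.mod_eq_of_lt hlt]
        simp [List.getD, (List.getElem?_eq_some_iff).mpr ⟨hlt, rfl⟩]
      · push_neg at hlt
        obtain ⟨j, rfl⟩ : ∃ j, k = cols.length + j := ⟨k - cols.length, by omega⟩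
        rw [List.getElem?_append_right (by simpa using hlt)]
        have hb : (cols.map (F r)).length = cols.length := by simp
        rw [hb, Nat.add_sub_cancel_left]
        have hj : j < rs.length * cols.length := by
          simp only [List.length_cons, Nat.succ_mul] at hk; omega
        rw [ih j hj]
        rw [Nat.add_comm cols.length j, Nat.add_div_right _ hn, Nat.add_mod_right]
        simp [List.getD]

-- the A-side result written via enumerate over the flattened grid
theorem pv_A_eq (source_shape : Int × Int) (window_size overlap : Int) :
    generate_resampling_windows source_shape window_size overlap =
      (PySem.List.enumerate
        ((PySem.List.pyRange 0 source_shape.1 (window_size - overlap)).flatMap (fun rs =>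
          (PySem.List.pyRange 0 source_shape.2 (window_size - overlap)).map (fun cs =>
            (rs, min (rs + window_size) source_shape.1, cs, min (cs + window_size) source_shape.2)))) 0).map
        (fun q => (q.2, q.1)) := by
  unfold generate_resampling_windows
  dsimp only
  rw [pv_outer_fold (fun rs cs => (rs, min (rs + window_size) source_shape.1, cs, min (cs + window_size) source_shape.2))]
  simp

theorem generate_resampling_windows_spec_aux (source_shape : Int × Int) (window_size overlap : Int) :
    generate_resampling_windows source_shape window_size overlap =
      generate_resampling_windows_alt source_shape window_size overlap := by
  rw [pv_A_eq]
  unfold generate_resampling_windows_alt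
  dsimp only
  set h := source_shape.1
  set w := source_shape.2
  set step := window_size - overlap with hstep
  set rows := PySem.List.pyRange 0 h step with hrows
  set cols := PySem.List.pyRange 0 w step with hcols
  set F : Int → Int → (Int × Int × Int × Int) := fun rs cs =>
    (rs, min (rs + window_size) h, cs, min (cs + window_size) w) with hF
  have hN : ((rows.length : Int) * (cols.length : Int)) = ((rows.length * cols.length : Nat) : Int) := by
    push_cast; ring
  rw [hN, PySem.List.pyRange_zero_natCast]
  apply List.ext_getElem?
  intro k
  by_cases hk : k < rows.length * cols.length
  · have hn : 0 < cols.length := by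
      rcases Nat.eq_zero_or_pos cols.length with h0 | h0
      · rw [h0] at hk; simp at hk
      · exact h0
    have hk' : k < cols.length * rows.length := by rw [Nat.mul_comm]; exact hk
    have hdiv : k / cols.length < rows.length := Nat.div_lt_of_lt_mul hk'
    have hmod : k % cols.length < cols.length := Nat.mod_lt _ hn
    rw [List.getElem?_map, PySem.List.getElem?_enumerate, pv_flat_get F cols rows k hk,
      List.map_map, List.getElem?_map, List.getElem?_range hk]
    simp only [Option.map_some, Function.comp_apply]
    rw [PySem.Int.floordiv_natCast k cols.length, PySem.Int.mod_natCast k cols.length,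
      PySem.List.pyGet?_natCast, PySem.List.pyGet?_natCast]
    rw [(List.getElem?_eq_some_iff).mpr ⟨hdiv, rfl⟩, (List.getElem?_eq_some_iff).mpr ⟨hmod, rfl⟩]
    simp [hF, List.getD, (List.getElem?_eq_some_iff).mpr ⟨hdiv, rfl⟩,
      (List.getElem?_eq_some_iff).mpr ⟨hmod, rfl⟩]
  · push_neg at hk
    rw [List.getElem?_eq_none, List.getElem?_eq_none]
    · simp only [List.length_map, List.length_range]; exact hk
    · rw [List.length_map, PySem.List.length_enumerate, pv_flat_length]; exact hk

-- ===== VERDICT (by name: the statement is the Claim_ definition above) =====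
theorem generate_resampling_windows_spec : Claim_equal_generate_resampling_windows := by
  intro s ws o _ _
  exact generate_resampling_windows_spec_aux s ws o
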